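-- pv_equiv track=rewrite | github.com/miliar/Code_Jam_Webscraper | Solutions_python/Problem_138/1156.py | d_war
-- ===== SOURCE A (Python) =====
-- def d_war(n,k):
-- 	points = 0
-- 	n = sorted(n)
-- 	k = sorted(k)
-- 	for i in range(len(n)):
-- 		if(n[i] > k[i]):
-- 			points+=1
-- 		else:
-- 			k.insert(0,k.pop())
-- 	return points
-- ===== SOURCE B (Python) =====
-- def d_war(n, k):
--     ks = sorted(k)
--     p = 0
--     for x in sorted(n):
--         if x > ks[p]:
--             p += 1
--     return p
-- ===== Notes on version B (the rewrite author's own statement) =====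
-- stated objective: alternative
-- what changed: A repeatedly rotates the sorted k list via insert(0, pop()) inside an index loop; B observes that the current k[i] always equals k_sorted[points] and replaces the rotating-list state with a single pointer walk over the two sorted lists, keeping only the counter.
import Mathlib
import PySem

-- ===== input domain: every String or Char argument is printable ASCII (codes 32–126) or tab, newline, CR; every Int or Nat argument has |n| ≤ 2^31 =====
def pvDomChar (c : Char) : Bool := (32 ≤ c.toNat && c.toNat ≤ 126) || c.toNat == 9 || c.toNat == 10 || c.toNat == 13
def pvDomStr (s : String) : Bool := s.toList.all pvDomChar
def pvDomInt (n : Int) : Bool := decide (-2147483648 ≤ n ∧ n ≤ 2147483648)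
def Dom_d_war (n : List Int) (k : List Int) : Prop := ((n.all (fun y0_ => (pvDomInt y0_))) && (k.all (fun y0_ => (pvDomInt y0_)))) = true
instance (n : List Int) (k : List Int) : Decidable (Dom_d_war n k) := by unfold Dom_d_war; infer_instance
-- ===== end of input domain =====

-- B: instead of A's rotating-list state (insert(0, pop()) each non-win), B walks the two sorted lists with a single win counter, using that A's current k[i] always equals sorted(k)[points] (objective: alternative).

-- ===== PORT A =====
-- k.insert(0, k.pop()): pop the last element and push it to the front (rotate right by one)
def pvRot1 (l : List Int) : List Int := (l.getLast?.getD 0) :: l.dropLast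

def d_war (n : List Int) (k : List Int) : Int :=
  let ns := PySem.List.sorted n (fun x => x) false
  let ks := PySem.List.sorted k (fun x => x) false
  let st := (List.range ns.length).foldl
    (fun (st : Int × List Int) (i : Nat) =>
      if ns.getD i 0 > st.2.getD i 0 then (st.1 + 1, st.2)
      else (st.1, pvRot1 st.2))
    (0, ks)
  st.1

-- ===== PORT B =====
def d_war_alt (n : List Int) (k : List Int) : Int :=
  let ks := PySem.List.sorted k (fun x => x) false
  (PySem.List.sorted n (fun x => x) false).foldl
    (fun (p : Int) (x : Int) => if x > ks.getD p.toNat 0 then p + 1 else p) 0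

-- ===== PRECONDITION & SPEC =====
-- Pre_ excludes exactly the inputs with len(n) > len(k), on which A raises (IndexError, or pop from empty list).
def Pre_d_war (n : List Int) (k : List Int) : Prop := n.length ≤ k.length
instance (n : List Int) (k : List Int) : Decidable (Pre_d_war n k) := by unfold Pre_d_war; infer_instance
def pvWitness_d_war : List Int × List Int := ([3, 1, 2], [2, 2, 4])

def Spec_d_war (n : List Int) (k : List Int) (out : Int) : Prop := out = d_war_alt n k
instance (n : List Int) (k : List Int) (out : Int) : Decidable (Spec_d_war n k out) := by unfold Spec_d_war; infer_instance

-- ===== CLAIM (what is proved, stated in full; the proofs are below) =====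
def Claim_equal_d_war : Prop := ∀ (n : List Int) (k : List Int), Dom_d_war n k → Pre_d_war n k → Spec_d_war n k (d_war n k)

-- ===== LEMMAS AND PROOFS =====

-- r-fold right rotation, outermost rotation last (matching the loop's state evolution)
def pvRotN : Nat → List Int → List Int
  | 0, l => l
  | r + 1, l => pvRot1 (pvRotN r l)

theorem pvRot1_length (l : List Int) (h : l ≠ []) : (pvRot1 l).length = l.length := by
  have h0 : l.length ≠ 0 := fun he => h (List.length_eq_zero_iff.mp he)
  simp [pvRot1, List.length_dropLast]
  omega

theorem pvRotN_length (r : Nat) (l : List Int) (h : l ≠ []) : (pvRotN r l).length = l.length := by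
  induction r with
  | zero => rfl
  | succ r ih =>
    have hne : pvRotN r l ≠ [] := by
      intro he
      have := ih
      simp [he] at this
      exact h (List.eq_nil_of_length_eq_zero (by omega))
    simp [pvRotN, pvRot1_length _ hne, ih]

theorem pvRot1_getD (l : List Int) (j : Nat) (h1 : 1 ≤ j) (h2 : j < l.length) :
    (pvRot1 l).getD j 0 = l.getD (j - 1) 0 := by
  obtain ⟨j', rfl⟩ : ∃ j', j = j' + 1 := ⟨j - 1, by omega⟩
  simp only [pvRot1, List.getD_cons_succ, Nat.add_sub_cancel]
  simp [List.getD, (by omega : j' < l.length - 1), List.getElem?_eq_getElem (by omega : j' < l.length)]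

theorem pvRotN_getD (r : Nat) (l : List Int) :
    ∀ (j : Nat), r ≤ j → j < l.length → (pvRotN r l).getD j 0 = l.getD (j - r) 0 := by
  induction r with
  | zero => intro j _ _; simp [pvRotN]
  | succ r ih =>
    intro j hr hj
    have hl : l ≠ [] := by intro he; simp [he] at hj
    have hlen := pvRotN_length r l hl
    have h := pvRot1_getD (pvRotN r l) j (by omega) (by omega)
    rw [pvRotN, h, ih (j - 1) (by omega) (by omega)]
    congr 1
    omega

-- A's loop over indices [i, i+rest.length) with state (p, rotated ks) equals B's fold over rest.
theorem pv_main (ks : List Int) :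
    ∀ (rest ns : List Int) (i : Nat) (p : Int),
      0 ≤ p → p.toNat ≤ i → i + rest.length ≤ ks.length → ns.drop i = rest →
      ((List.range' i rest.length).foldl
        (fun (st : Int × List Int) (j : Nat) =>
          if ns.getD j 0 > st.2.getD j 0 then (st.1 + 1, st.2)
          else (st.1, pvRot1 st.2))
        (p, pvRotN (i - p.toNat) ks)).1
      = rest.foldl (fun (q : Int) (x : Int) => if x > ks.getD q.toNat 0 then q + 1 else q) p := by
  intro rest
  induction rest with
  | nil => intro ns i p _ _ _ _; simp
  | cons x rest' ih =>
    intro ns i p hp0 hpi hlen hdrop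
    have hi : i < ks.length := by simp at hlen; omega
    have hx : ns.getD i 0 = x := by
      have : ns[i]? = some x := by
        have := congrArg (fun l => l[0]?) hdrop
        simpa [List.getElem?_drop] using this
      simp [List.getD, this]
    have hdrop' : ns.drop (i + 1) = rest' := by
      have := congrArg (List.drop 1) hdrop
      simpa [List.drop_drop, Nat.add_comm] using this
    have hkk : (pvRotN (i - p.toNat) ks).getD i 0 = ks.getD p.toNat 0 := by
      rw [pvRotN_getD (i - p.toNat) ks i (by omega) hi]
      congr 1
      omega
    simp only [List.length_cons, List.range'_succ, List.foldl_cons, hx, hkk]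
    by_cases hcmp : x > ks.getD p.toNat 0
    · rw [if_pos hcmp, if_pos hcmp]
      have he : i + 1 - (p + 1).toNat = i - p.toNat := by omega
      have := ih ns (i + 1) (p + 1) (by omega) (by omega) (by simp at hlen ⊢; omega) hdrop'
      rw [he] at this
      exact this
    · rw [if_neg hcmp, if_neg hcmp]
      have he : pvRot1 (pvRotN (i - p.toNat) ks) = pvRotN (i + 1 - p.toNat) ks := by
        have : i + 1 - p.toNat = (i - p.toNat) + 1 := by omega
        rw [this]; rfl
      rw [he]
      exact ih ns (i + 1) p hp0 (by omega) (by simp at hlen ⊢; omega) hdrop'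

-- ===== VERDICT (by name: the statement is the Claim_ definition above) =====
theorem d_war_spec : Claim_equal_d_war := by
  intro n k _ hpre
  unfold Spec_d_war
  simp only [d_war, d_war_alt]
  rw [List.range_eq_range']
  have hlen_n : (PySem.List.sorted n (fun x => x) false).length = n.length :=
    PySem.List.length_sorted n (fun x => x) false
  have hlen_k : (PySem.List.sorted k (fun x => x) false).length = k.length :=
    PySem.List.length_sorted k (fun x => x) false
  have := pv_main (PySem.List.sorted k (fun x => x) false)
    (PySem.List.sorted n (fun x => x) false) (PySem.List.sorted n (fun x => x) false) 0 0
    le_rfl (by simp) (by simp [hlen_n, hlen_k]; exact hpre) (by simp)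
  simpa [pvRotN] using this
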